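-- pv_equiv track=rewrite | github.com/voidfishRae/Crime-Ridge-Regression | miniproject2.py | comp_by_class
-- ===== SOURCE A (Python) =====
-- def comp_by_class(pred, cal):
--     high_high_counter = 0
--     high_low_counter = 0
--     low_high_counter = 0
--     low_low_counter = 0
--
--     for i in range(len(cal)):
--         if pred[i] == "high violence" and cal[i] == "high violence":
--             high_high_counter += 1
--         elif pred[i] == "high violence" and cal[i] == "low violence":
--             high_low_counter += 1
--         elif pred[i] == "low violence" and cal[i] == "high violence":
--             low_high_counter += 1
--         else:
--             low_low_counter += 1
--
--     return high_high_counter, high_low_counter, low_high_counter, low_low_counter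
-- ===== SOURCE B (Python) =====
-- def comp_by_class(pred, cal):
--     total = len(cal)
--     hh = sum(1 for i in range(len(cal))
--              if pred[i] == "high violence" and cal[i] == "high violence")
--     hl = sum(1 for i in range(len(cal))
--              if pred[i] == "high violence" and cal[i] == "low violence")
--     lh = sum(1 for i in range(len(cal))
--              if pred[i] == "low violence" and cal[i] == "high violence")
--     return hh, hl, lh, total - hh - hl - lh
-- ===== Notes on version B (the rewrite author's own statement) =====
-- stated objective: alternative
-- what changed: Replaces the single four-accumulator loop with three independent counting passes for the explicit confusion cells plus deriving the fourth cell by subtraction from the total, which absorbs non-matching labels exactly like A's else branch.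
-- outside the precondition, e.g. on comp_by_class([], ['low violence']): A raises IndexError, B raises IndexError
import Mathlib
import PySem

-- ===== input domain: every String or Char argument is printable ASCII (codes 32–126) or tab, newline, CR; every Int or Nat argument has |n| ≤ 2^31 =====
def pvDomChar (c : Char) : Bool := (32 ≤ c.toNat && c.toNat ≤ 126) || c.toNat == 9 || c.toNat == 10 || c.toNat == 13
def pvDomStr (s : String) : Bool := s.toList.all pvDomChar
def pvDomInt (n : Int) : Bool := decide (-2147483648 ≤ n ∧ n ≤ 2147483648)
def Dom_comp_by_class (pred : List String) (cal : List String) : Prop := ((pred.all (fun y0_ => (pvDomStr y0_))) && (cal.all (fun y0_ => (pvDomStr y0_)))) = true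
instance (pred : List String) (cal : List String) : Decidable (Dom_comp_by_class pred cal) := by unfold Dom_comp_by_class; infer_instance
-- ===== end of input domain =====

-- B: three independent counting passes for the explicit cells, fourth cell by subtraction from the total (alternative decomposition, same cost).


-- ===== PORT A =====
-- one loop over range(len(cal)) updating four counters; pred[i]/cal[i] via pyGet? (Pre_ guarantees the index is in range, so getD "" is never exercised)
def pvStepA (pred : List String) (cal : List String) (s : Int × Int × Int × Int) (i : Int) : Int × Int × Int × Int :=
  if (PySem.List.pyGet? pred i).getD "" = "high violence" ∧ (PySem.List.pyGet? cal i).getD "" = "high violence" then (s.1 + 1, s.2.1, s.2.2.1, s.2.2.2)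
  else if (PySem.List.pyGet? pred i).getD "" = "high violence" ∧ (PySem.List.pyGet? cal i).getD "" = "low violence" then (s.1, s.2.1 + 1, s.2.2.1, s.2.2.2)
  else if (PySem.List.pyGet? pred i).getD "" = "low violence" ∧ (PySem.List.pyGet? cal i).getD "" = "high violence" then (s.1, s.2.1, s.2.2.1 + 1, s.2.2.2)
  else (s.1, s.2.1, s.2.2.1, s.2.2.2 + 1)

def comp_by_class (pred : List String) (cal : List String) : Int × Int × Int × Int :=
  (PySem.List.pyRange 0 cal.length 1).foldl (pvStepA pred cal) (0, 0, 0, 0)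

-- ===== PORT B =====
def pvCellF (pred : List String) (cal : List String) (pv cv : String) (acc : Int) (i : Int) : Int :=
  if (PySem.List.pyGet? pred i).getD "" = pv ∧ (PySem.List.pyGet? cal i).getD "" = cv then acc + 1 else acc

-- sum(1 for i in range(len(cal)) if pred[i] == pv and cal[i] == cv)
def pvCell (pred : List String) (cal : List String) (pv cv : String) : Int :=
  (PySem.List.pyRange 0 cal.length 1).foldl (pvCellF pred cal pv cv) 0

def comp_by_class_alt (pred : List String) (cal : List String) : Int × Int × Int × Int :=
  let total : Int := cal.length
  let hh := pvCell pred cal "high violence" "high violence"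
  let hl := pvCell pred cal "high violence" "low violence"
  let lh := pvCell pred cal "low violence" "high violence"
  (hh, hl, lh, total - hh - hl - lh)

-- ===== PRECONDITION & SPEC =====
-- Pre_ excludes inputs where pred is shorter than cal: there Python A raises IndexError at pred[i] (and Python B raises the same way).
def Pre_comp_by_class (pred : List String) (cal : List String) : Prop := cal.length ≤ pred.length
instance (pred : List String) (cal : List String) : Decidable (Pre_comp_by_class pred cal) := by unfold Pre_comp_by_class; infer_instance
def pvWitness_comp_by_class : List String × List String :=
  (["high violence", "low violence", "junk"], ["high violence", "high violence", "low violence"])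
def Spec_comp_by_class (pred : List String) (cal : List String) (out : Int × Int × Int × Int) : Prop := out = comp_by_class_alt pred cal
instance (pred : List String) (cal : List String) (out : Int × Int × Int × Int) : Decidable (Spec_comp_by_class pred cal out) := by unfold Spec_comp_by_class; infer_instance

-- ===== CLAIM (what is proved, stated in full; the proofs are below) =====
def Claim_equal_comp_by_class : Prop := ∀ (pred : List String) (cal : List String), Dom_comp_by_class pred cal → Pre_comp_by_class pred cal → Spec_comp_by_class pred cal (comp_by_class pred cal)

-- ===== LEMMAS AND PROOFS =====

lemma pvCellF_shift (pred cal : List String) (pv cv : String) :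
    ∀ (L : List Int) (acc : Int),
      L.foldl (pvCellF pred cal pv cv) acc = acc + L.foldl (pvCellF pred cal pv cv) 0 := by
  intro L
  induction L with
  | nil => intro acc; simp
  | cons i L ih =>
    intro acc
    simp only [List.foldl_cons]
    rw [ih (pvCellF pred cal pv cv acc i), ih (pvCellF pred cal pv cv 0 i)]
    unfold pvCellF
    split_ifs <;> ring

lemma pvFold_key (pred cal : List String) :
    ∀ (L : List Int) (s : Int × Int × Int × Int),
      L.foldl (pvStepA pred cal) s =
        (s.1 + L.foldl (pvCellF pred cal "high violence" "high violence") 0,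
         s.2.1 + L.foldl (pvCellF pred cal "high violence" "low violence") 0,
         s.2.2.1 + L.foldl (pvCellF pred cal "low violence" "high violence") 0,
         s.2.2.2 + (L.length : Int)
           - L.foldl (pvCellF pred cal "high violence" "high violence") 0
           - L.foldl (pvCellF pred cal "high violence" "low violence") 0
           - L.foldl (pvCellF pred cal "low violence" "high violence") 0) := by
  intro L
  induction L with
  | nil => intro s; simp
  | cons i L ih =>
    intro s
    simp only [List.foldl_cons, List.length_cons]
    rw [ih]
    by_cases h1 : (PySem.List.pyGet? pred i).getD "" = "high violence" ∧ (PySem.List.pyGet? cal i).getD "" = "high violence"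
    · rw [show pvStepA pred cal s i = (s.1 + 1, s.2.1, s.2.2.1, s.2.2.2) from by simp [pvStepA, h1],
          show pvCellF pred cal "high violence" "high violence" 0 i = 1 from by simp [pvCellF, h1.1, h1.2],
          show pvCellF pred cal "high violence" "low violence" 0 i = 0 from by simp [pvCellF, h1.1, h1.2],
          show pvCellF pred cal "low violence" "high violence" 0 i = 0 from by simp [pvCellF, h1.1, h1.2],
          pvCellF_shift pred cal "high violence" "high violence" L 1,
          pvCellF_shift pred cal "high violence" "low violence" L 0,
          pvCellF_shift pred cal "low violence" "high violence" L 0]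
      refine Prod.ext ?_ (Prod.ext ?_ (Prod.ext ?_ ?_)) <;> push_cast <;> ring
    · by_cases h2 : (PySem.List.pyGet? pred i).getD "" = "high violence" ∧ (PySem.List.pyGet? cal i).getD "" = "low violence"
      · rw [show pvStepA pred cal s i = (s.1, s.2.1 + 1, s.2.2.1, s.2.2.2) from by simp [pvStepA, h1, h2],
            show pvCellF pred cal "high violence" "high violence" 0 i = 0 from by simp [pvCellF, h1],
            show pvCellF pred cal "high violence" "low violence" 0 i = 1 from by simp [pvCellF, h2.1, h2.2],
            show pvCellF pred cal "low violence" "high violence" 0 i = 0 from by simp [pvCellF, h2.1, h2.2],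
            pvCellF_shift pred cal "high violence" "high violence" L 0,
            pvCellF_shift pred cal "high violence" "low violence" L 1,
            pvCellF_shift pred cal "low violence" "high violence" L 0]
        refine Prod.ext ?_ (Prod.ext ?_ (Prod.ext ?_ ?_)) <;> push_cast <;> ring
      · by_cases h3 : (PySem.List.pyGet? pred i).getD "" = "low violence" ∧ (PySem.List.pyGet? cal i).getD "" = "high violence"
        · rw [show pvStepA pred cal s i = (s.1, s.2.1, s.2.2.1 + 1, s.2.2.2) from by simp [pvStepA, h1, h3],
              show pvCellF pred cal "high violence" "high violence" 0 i = 0 from by simp [pvCellF, h1],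
              show pvCellF pred cal "high violence" "low violence" 0 i = 0 from by simp [pvCellF, h2],
              show pvCellF pred cal "low violence" "high violence" 0 i = 1 from by simp [pvCellF, h3.1, h3.2],
              pvCellF_shift pred cal "high violence" "high violence" L 0,
              pvCellF_shift pred cal "high violence" "low violence" L 0,
              pvCellF_shift pred cal "low violence" "high violence" L 1]
          refine Prod.ext ?_ (Prod.ext ?_ (Prod.ext ?_ ?_)) <;> push_cast <;> ring
        · rw [show pvStepA pred cal s i = (s.1, s.2.1, s.2.2.1, s.2.2.2 + 1) from by simp [pvStepA, h1, h2, h3],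
              show pvCellF pred cal "high violence" "high violence" 0 i = 0 from by simp [pvCellF, h1],
              show pvCellF pred cal "high violence" "low violence" 0 i = 0 from by simp [pvCellF, h2],
              show pvCellF pred cal "low violence" "high violence" 0 i = 0 from by simp [pvCellF, h3],
              pvCellF_shift pred cal "high violence" "high violence" L 0,
              pvCellF_shift pred cal "high violence" "low violence" L 0,
              pvCellF_shift pred cal "low violence" "high violence" L 0]
          refine Prod.ext ?_ (Prod.ext ?_ (Prod.ext ?_ ?_)) <;> push_cast <;> ring

-- ===== VERDICT (by name: the statement is the Claim_ definition above) =====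
theorem comp_by_class_spec : Claim_equal_comp_by_class := by
  intro pred cal _ _
  unfold Spec_comp_by_class comp_by_class comp_by_class_alt pvCell
  rw [pvFold_key]
  simp [PySem.List.length_pyRange_one]
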